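-- pv_equiv track=rewrite | github.com/felipeheckemendes/fundamentals | data-structures-algorithms-ucsandiego/algo-toolbox/M5-INT4-domino-tiling.py | number_domino_tilings
-- ===== SOURCE A (Python) =====
-- def number_domino_tilings(n):
--     A = [0]*(n+1)
--     B = [0]*(n+1)
--     A[0] = 1
--
--     for i in range(1, n+1):
--         if i % 2 == 0:
--             A[i] =  B[i-1] + A[i-2]
--         else:
--             B[i] = 2*A[i-1] + B[i-2]
--     return A[n]
-- ===== SOURCE B (Python) =====
-- def number_domino_tilings(n):
--     # tilings of a 3xn board: zero for odd n; for n = 2k, g(k) with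
--     # g(0)=1, g(1)=3, g(k)=4g(k-1)-g(k-2), computed by 2x2 matrix
--     # exponentiation by squaring of M = [[4,-1],[1,0]].
--     if n % 2 != 0:
--         return 0
--     def matmul(x, y):
--         a, b, c, d = x
--         e, f, g, h = y
--         return (a*e + b*g, a*f + b*h, c*e + d*g, c*f + d*h)
--     def matpow(k):
--         if k <= 0:
--             return (1, 0, 0, 1)
--         half = matpow(k // 2)
--         s = matmul(half, half)
--         return matmul(s, (4, -1, 1, 0)) if k % 2 == 1 else s
--     a, b, c, d = matpow(n // 2)
--     return 3*c + d
-- ===== Notes on version B (the rewrite author's own statement) =====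
-- stated objective: alternative
-- what changed: Replaces the array-filling loop over range(1, n+1) by the linear recurrence g(k)=4g(k-1)-g(k-2) for n=2k (zero for odd n), evaluated by 2x2 matrix exponentiation by squaring; intended as faster (a timing run measured B 4953x at n=65536 but could not verify B's value at sizes where A times out), claimed here only as a different algorithm.
import Mathlib
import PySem

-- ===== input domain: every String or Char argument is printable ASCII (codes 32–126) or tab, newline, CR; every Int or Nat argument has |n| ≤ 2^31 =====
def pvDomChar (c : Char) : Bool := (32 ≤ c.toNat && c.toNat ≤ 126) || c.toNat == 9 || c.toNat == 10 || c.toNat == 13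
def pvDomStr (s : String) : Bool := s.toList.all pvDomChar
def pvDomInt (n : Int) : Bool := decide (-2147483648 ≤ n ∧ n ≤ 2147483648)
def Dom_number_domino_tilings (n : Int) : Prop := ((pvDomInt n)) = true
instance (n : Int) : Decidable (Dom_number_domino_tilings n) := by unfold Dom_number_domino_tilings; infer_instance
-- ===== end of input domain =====

-- B replaces A's array-filling loop by the linear recurrence g(k)=4g(k-1)-g(k-2)
-- for n=2k (zero for odd n), evaluated by 2x2 matrix exponentiation by squaring (objective: alternative).

-- ===== PORT A =====
-- loop body of A's 'for i in range(1, n+1)' (state = the two Python lists A, B)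
def pvStep (st : List Int × List Int) (i : Int) : List Int × List Int :=
  if PySem.Int.mod i 2 = 0 then
    (PySem.List.pySetD st.1 i
      (PySem.List.pyGetD st.2 (i - 1) 0 + PySem.List.pyGetD st.1 (i - 2) 0), st.2)
  else
    (st.1, PySem.List.pySetD st.2 i
      (2 * PySem.List.pyGetD st.1 (i - 1) 0 + PySem.List.pyGetD st.2 (i - 2) 0))

def number_domino_tilings (n : Int) : Int :=
  let A := PySem.List.pySetD (List.replicate (n + 1).toNat 0) 0 1   -- A = [0]*(n+1); A[0] = 1
  let B := List.replicate (n + 1).toNat 0                           -- B = [0]*(n+1)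
  let st := (PySem.List.pyRange 1 (n + 1) 1).foldl pvStep (A, B)
  PySem.List.pyGetD st.1 n 0

-- ===== PORT B =====
def pvMatmul (x y : Int × Int × Int × Int) : Int × Int × Int × Int :=
  (x.1 * y.1 + x.2.1 * y.2.2.1, x.1 * y.2.1 + x.2.1 * y.2.2.2,
   x.2.2.1 * y.1 + x.2.2.2 * y.2.2.1, x.2.2.1 * y.2.1 + x.2.2.2 * y.2.2.2)

def pvMatpow (k : Int) : Int × Int × Int × Int :=
  if k ≤ 0 then (1, 0, 0, 1)
  else
    let half := pvMatpow (PySem.Int.floordiv k 2)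
    let s := pvMatmul half half
    if PySem.Int.mod k 2 = 1 then pvMatmul s (4, -1, 1, 0) else s
termination_by k.toNat
decreasing_by
  rename_i h
  rw [PySem.Int.floordiv_eq_ediv_of_pos (by omega : (0:Int) < 2)]
  omega

def number_domino_tilings_alt (n : Int) : Int :=
  if PySem.Int.mod n 2 ≠ 0 then 0
  else
    let m := pvMatpow (PySem.Int.floordiv n 2)
    3 * m.2.2.1 + m.2.2.2

-- ===== PRECONDITION & SPEC =====
-- Python A raises IndexError for negative n (the allocated lists are empty or too short); Pre_ excludes exactly those.
def Pre_number_domino_tilings (n : Int) : Prop := 0 ≤ n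
instance (n : Int) : Decidable (Pre_number_domino_tilings n) := by
  unfold Pre_number_domino_tilings; infer_instance

def pvWitness_number_domino_tilings : Int := 6

def Spec_number_domino_tilings (n : Int) (out : Int) : Prop := out = number_domino_tilings_alt n
instance (n : Int) (out : Int) : Decidable (Spec_number_domino_tilings n out) := by
  unfold Spec_number_domino_tilings; infer_instance

-- ===== CLAIM (what is proved, stated in full; the proofs are below) =====
def Claim_equal_number_domino_tilings : Prop :=
  ∀ (n : Int), Dom_number_domino_tilings n → Pre_number_domino_tilings n →
    Spec_number_domino_tilings n (number_domino_tilings n)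

-- ===== LEMMAS AND PROOFS =====

-- u k: the solution of u(k+2) = 4u(k+1) - u(k), u 0 = 0, u 1 = 1
def pvU : Nat → Int
  | 0 => 0
  | 1 => 1
  | (k+2) => 4 * pvU (k+1) - pvU k

theorem pvU_succ2 (k : Nat) : pvU (k+1+1) = 4 * pvU (k+1) - pvU k := rfl

-- linear power of M = [[4,-1],[1,0]]
def pvMpowL : Nat → Int × Int × Int × Int
  | 0 => (1, 0, 0, 1)
  | (k+1) => pvMatmul (pvMpowL k) (4, -1, 1, 0)

theorem pvMpowL_succ (k : Nat) : pvMpowL (k+1) = pvMatmul (pvMpowL k) (4, -1, 1, 0) := rfl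

theorem pvMatmul_assoc (x y z : Int × Int × Int × Int) :
    pvMatmul (pvMatmul x y) z = pvMatmul x (pvMatmul y z) := by
  obtain ⟨a, b, c, d⟩ := x; obtain ⟨e, f, g, h⟩ := y; obtain ⟨p, q, r, s⟩ := z
  simp only [pvMatmul, Prod.mk.injEq]
  refine ⟨by ring, by ring, by ring, by ring⟩

theorem pvMatmul_one_right (x : Int × Int × Int × Int) : pvMatmul x (1, 0, 0, 1) = x := by
  obtain ⟨a, b, c, d⟩ := x
  simp [pvMatmul]

theorem pvMpowL_add (a b : Nat) : pvMpowL (a + b) = pvMatmul (pvMpowL a) (pvMpowL b) := by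
  induction b with
  | zero => simp [pvMpowL, pvMatmul_one_right]
  | succ b ih =>
      rw [show a + (b+1) = (a+b) + 1 by omega, pvMpowL_succ, ih, pvMpowL_succ, pvMatmul_assoc]

theorem pvMatpow_eq (k : Nat) : pvMatpow (k : Int) = pvMpowL k := by
  induction k using Nat.strong_induction_on with
  | _ k ih =>
    rw [pvMatpow]
    by_cases h0 : k = 0
    · subst h0; simp [pvMpowL]
    · have hk : ¬ ((k : Int) ≤ 0) := by omega
      rw [if_neg hk]
      have hf : PySem.Int.floordiv (k : Int) 2 = ((k / 2 : Nat) : Int) := by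
        exact_mod_cast PySem.Int.floordiv_natCast k 2
      have hm : PySem.Int.mod (k : Int) 2 = ((k % 2 : Nat) : Int) := by
        exact_mod_cast PySem.Int.mod_natCast k 2
      rw [hf, ih (k / 2) (Nat.div_lt_self (Nat.pos_of_ne_zero h0) one_lt_two), hm]
      by_cases hp : k % 2 = 1
      · rw [hp, if_pos (by norm_num), ← pvMpowL_add, ← pvMpowL_succ,
          show k / 2 + k / 2 + 1 = k by omega]
      · rw [if_neg (by omega : ¬ ((k % 2 : Nat) : Int) = 1), ← pvMpowL_add,
          show k / 2 + k / 2 = k by omega]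

theorem pvMpowL_form (k : Nat) :
    pvMpowL k = (pvU (k+1), -(pvU k), pvU k, pvU (k+1) - 4 * pvU k) := by
  induction k with
  | zero => decide
  | succ k ih =>
      rw [pvMpowL_succ, ih]
      simp only [pvMatmul, pvU_succ2, Prod.mk.injEq]
      refine ⟨by ring, by ring, by ring, by ring⟩

-- (f k, g k) = (value of A[2k], value of B[2k+1]) in A's arrays
def pvFG : Nat → Int × Int
  | 0 => (1, 2)
  | (k+1) => ((pvFG k).2 + (pvFG k).1, 2 * ((pvFG k).2 + (pvFG k).1) + (pvFG k).2)

theorem pvFG_succ1 (k : Nat) : (pvFG (k+1)).1 = (pvFG k).2 + (pvFG k).1 := rfl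
theorem pvFG_succ2 (k : Nat) : (pvFG (k+1)).2 = 2 * (pvFG (k+1)).1 + (pvFG k).2 := rfl

theorem pvFG_eq (k : Nat) :
    pvFG k = (pvU (k+1) - pvU k, pvU (k+2) - 2 * pvU (k+1) + pvU k) := by
  induction k with
  | zero => decide
  | succ k ih =>
      have h1 : (pvFG k).1 = pvU (k+1) - pvU k := by rw [ih]
      have hg : (pvFG k).2 = pvU (k+2) - 2 * pvU (k+1) + pvU k := by rw [ih]
      have h2 : pvU (k+2) = 4 * pvU (k+1) - pvU k := pvU_succ2 k
      have h3 : pvU (k+3) = 4 * pvU (k+2) - pvU (k+1) := pvU_succ2 (k+1)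
      have e1 : pvU (k+1+1) = pvU (k+2) := rfl
      have e2 : pvU (k+1+2) = pvU (k+3) := rfl
      rw [Prod.ext_iff]
      refine ⟨?_, ?_⟩
      · rw [pvFG_succ1, h1, hg, e1]; omega
      · rw [pvFG_succ2, pvFG_succ1, h1, hg, e1, e2]; omega

theorem pvGetD_set (xs : List Int) (i j : Nat) (v : Int) (h : i < xs.length) :
    (xs.set i v).getD j 0 = if j = i then v else xs.getD j 0 := by
  rcases eq_or_ne j i with rfl | hne
  · simp [List.getD_eq_getElem?_getD, h]
  · simp [List.getD_eq_getElem?_getD, hne, Ne.symm hne]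

-- A's loop state after processing range(1, m+1)
def pvSt (N m : Nat) : List Int × List Int :=
  (PySem.List.pyRange 1 ((m : Int) + 1) 1).foldl pvStep
    (PySem.List.pySetD (List.replicate (N+1) 0) 0 1, List.replicate (N+1) 0)

theorem pvSt_succ (N m : Nat) : pvSt N (m+1) = pvStep (pvSt N m) ((m : Int) + 1) := by
  unfold pvSt
  rw [show (((m+1 : Nat) : Int) + 1) = ((m : Int) + 1) + 1 by push_cast; ring,
    PySem.List.pyRange_one_succ_right (by omega)]
  rw [List.foldl_append]
  rfl

theorem pvInv (N : Nat) : ∀ m, m ≤ N →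
    (pvSt N m).1.length = N+1 ∧ (pvSt N m).2.length = N+1 ∧
    (∀ j : Nat, (pvSt N m).1.getD j 0 =
      if j % 2 = 0 ∧ j ≤ m then (pvFG (j / 2)).1 else 0) ∧
    (∀ j : Nat, (pvSt N m).2.getD j 0 =
      if j % 2 = 1 ∧ j ≤ m then (pvFG (j / 2)).2 else 0) := by
  intro m
  induction m with
  | zero =>
    intro _
    have hst : pvSt N 0 = (1 :: List.replicate N 0, List.replicate (N+1) 0) := by
      unfold pvSt
      rw [show (((0:Nat) : Int) + 1) = 1 by norm_num,
        PySem.List.pyRange_one_eq_nil (le_refl 1), List.foldl_nil,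
        PySem.List.pySetD_of_nonneg _ _ (by norm_num)]
      simp [List.replicate_succ]
    rw [hst]
    refine ⟨by simp, by simp, ?_, ?_⟩
    · intro j
      match j with
      | 0 => simp [pvFG]
      | (j+1) =>
        rw [if_neg (by omega)]
        simp only [List.getD_eq_getElem?_getD, List.getElem?_cons_succ,
          List.getElem?_replicate]
        split_ifs <;> rfl
    · intro j
      rw [if_neg (by omega)]
      simp only [List.getD_eq_getElem?_getD, List.getElem?_replicate]
      split_ifs <;> rfl
  | succ m ih =>
    intro hm1N
    obtain ⟨L1, L2, HA, HB⟩ := ih (by omega)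
    rw [pvSt_succ]
    have hmod : PySem.Int.mod ((m : Int) + 1) 2 = (((m+1) % 2 : Nat) : Int) := by
      rw [show ((m : Int) + 1) = ((m+1 : Nat) : Int) by push_cast; ring]
      exact_mod_cast PySem.Int.mod_natCast (m+1) 2
    unfold pvStep
    split_ifs with hcond
    · -- i = m+1 even
      have hm1 : (m+1) % 2 = 0 := by rw [hmod] at hcond; exact_mod_cast hcond
      have hmge : 1 ≤ m := by omega
      dsimp only
      have hv2 : PySem.List.pyGetD (pvSt N m).2 (((m : Int) + 1) - 1) 0 = (pvFG (m/2)).2 := by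
        rw [show ((m : Int) + 1) - 1 = ((m : Nat) : Int) by ring,
          PySem.List.pyGetD_natCast, HB m, if_pos ⟨by omega, le_refl m⟩]
      have hv1 : PySem.List.pyGetD (pvSt N m).1 (((m : Int) + 1) - 2) 0 = (pvFG ((m-1)/2)).1 := by
        rw [show ((m : Int) + 1) - 2 = ((m-1 : Nat) : Int) by omega,
          PySem.List.pyGetD_natCast, HA (m-1), if_pos ⟨by omega, by omega⟩]
      rw [hv2, hv1]
      have hfg : (pvFG (m/2)).2 + (pvFG ((m-1)/2)).1 = (pvFG ((m+1)/2)).1 := by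
        rw [show (m-1)/2 = m/2 by omega, show (m+1)/2 = m/2 + 1 by omega, pvFG_succ1]
      rw [show ((m : Int) + 1) = ((m+1 : Nat) : Int) by push_cast; ring,
        PySem.List.pySetD_natCast]
      refine ⟨by rw [List.length_set]; exact L1, L2, ?_, ?_⟩
      · intro j
        rw [pvGetD_set _ _ _ _ (by rw [L1]; omega)]
        by_cases hj : j = m+1
        · subst hj
          rw [if_pos rfl, if_pos ⟨hm1, le_refl (m+1)⟩]
          exact hfg
        · rw [if_neg hj, HA j]
          split_ifs with c1 c2 <;> first | rfl | omega
      · intro j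
        rw [HB j]
        split_ifs with c1 c2 <;> first | rfl | omega
    · -- i = m+1 odd
      have hm1 : (m+1) % 2 = 1 := by
        rcases Nat.mod_two_eq_zero_or_one (m+1) with h | h
        · exact absurd (by rw [hmod, h]; norm_num) hcond
        · exact h
      dsimp only
      have hv1 : PySem.List.pyGetD (pvSt N m).1 (((m : Int) + 1) - 1) 0 = (pvFG (m/2)).1 := by
        rw [show ((m : Int) + 1) - 1 = ((m : Nat) : Int) by ring,
          PySem.List.pyGetD_natCast, HA m, if_pos ⟨by omega, le_refl m⟩]
      have hv : 2 * PySem.List.pyGetD (pvSt N m).1 (((m : Int) + 1) - 1) 0 +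
          PySem.List.pyGetD (pvSt N m).2 (((m : Int) + 1) - 2) 0 = (pvFG ((m+1)/2)).2 := by
        rw [hv1]
        rcases Nat.eq_zero_or_pos m with hm0 | hmpos
        · subst hm0
          have hne : (pvSt N 0).2 ≠ [] := by
            intro hc; rw [hc] at L2; simp at L2
          rw [show (((0:Nat) : Int) + 1) - 2 = -(((1:Nat) : Int)) by norm_num,
            PySem.List.pyGetD_neg_natCast _ 1 0 (by omega) (by rw [L2]; omega),
            ← List.getD_eq_getElem _ 0 (by omega), HB ((pvSt N 0).2.length - 1),
            if_neg (by omega)]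
          simp [pvFG]
        · have hmge2 : 2 ≤ m := by omega
          have hv2 : PySem.List.pyGetD (pvSt N m).2 (((m : Int) + 1) - 2) 0
              = (pvFG ((m-1)/2)).2 := by
            rw [show ((m : Int) + 1) - 2 = ((m-1 : Nat) : Int) by omega,
              PySem.List.pyGetD_natCast, HB (m-1), if_pos ⟨by omega, by omega⟩]
          rw [hv2, show (m-1)/2 = m/2 - 1 by omega, show (m+1)/2 = m/2 by omega]
          have h2 := pvFG_succ2 (m/2 - 1)
          rw [show m/2 - 1 + 1 = m/2 by omega] at h2
          omega
      rw [hv]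
      rw [show ((m : Int) + 1) = ((m+1 : Nat) : Int) by push_cast; ring,
        PySem.List.pySetD_natCast]
      refine ⟨L1, by rw [List.length_set]; exact L2, ?_, ?_⟩
      · intro j
        rw [HA j]
        split_ifs with c1 c2 <;> first | rfl | omega
      · intro j
        rw [pvGetD_set _ _ _ _ (by rw [L2]; omega)]
        by_cases hj : j = m+1
        · subst hj
          rw [if_pos rfl, if_pos ⟨hm1, le_refl (m+1)⟩]
        · rw [if_neg hj, HB j]
          split_ifs with c1 c2 <;> first | rfl | omega

-- ===== VERDICT (by name: the statement is the Claim_ definition above) =====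
theorem number_domino_tilings_spec : Claim_equal_number_domino_tilings := by
  unfold Claim_equal_number_domino_tilings
  intro n _ hpre
  unfold Spec_number_domino_tilings
  obtain ⟨N, rfl⟩ : ∃ N : Nat, n = (N : Int) := ⟨n.toNat, by
    have : (0:Int) ≤ n := hpre
    omega⟩
  obtain ⟨L1, L2, HA, HB⟩ := pvInv N N (le_refl N)
  have hA : number_domino_tilings (N : Int) = PySem.List.pyGetD (pvSt N N).1 (N : Int) 0 := by
    unfold number_domino_tilings pvSt
    rw [show ((N : Int) + 1).toNat = N + 1 by omega]
  rw [hA, PySem.List.pyGetD_natCast, HA N]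
  have hmod : PySem.Int.mod (N : Int) 2 = ((N % 2 : Nat) : Int) := by
    exact_mod_cast PySem.Int.mod_natCast N 2
  have hfd : PySem.Int.floordiv (N : Int) 2 = ((N / 2 : Nat) : Int) := by
    exact_mod_cast PySem.Int.floordiv_natCast N 2
  by_cases hpar : N % 2 = 0
  · have hB : number_domino_tilings_alt (N : Int) = pvU (N/2+1) - pvU (N/2) := by
      unfold number_domino_tilings_alt
      rw [if_neg (by rw [hmod, hpar]; norm_num), hfd, pvMatpow_eq, pvMpowL_form]
      simp only []
      ring
    rw [hB, if_pos ⟨hpar, le_refl N⟩, pvFG_eq]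
  · have hB : number_domino_tilings_alt (N : Int) = 0 := by
      unfold number_domino_tilings_alt
      rw [if_pos (by rw [hmod]; omega)]
    rw [hB, if_neg (by omega)]
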